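-- pv_equiv track=rewrite | github.com/MrBrantCode/unitest_baseline | mut_generate/mist_train_taco/taco_16623/solution.py | find_minimum_rent_cost
-- ===== SOURCE A (Python) =====
-- from math import inf
--
-- def find_minimum_rent_cost(n, s, c):
--     # Initialize a 2D list to store the minimum costs for each state
--     dp = [[0, inf, inf, inf] for _ in range(n)]
--
--     # Base case: the first display can be the first in the sequence
--     dp[0][1] = c[0]
--
--     # Fill the dp table
--     for j in range(1, 4):
--         for i in range(1, n):
--             for k in reversed(range(i)):
--                 if j == 1 or s[k] < s[i]:
--                     dp[i][j] = min(dp[i][j], dp[k][j - 1] + c[i])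
--
--     # Find the minimum cost for the sequence of three displays
--     result = min((x[3] for x in dp))
--
--     # If the result is still inf, no valid sequence was found
--     return result if result != inf else -1
-- ===== SOURCE B (Python) =====
-- def find_minimum_rent_cost(n, s, c):
--     INF = float('inf')
--     ans = INF
--     for j in range(n):
--         left = min((c[k] for k in range(j) if s[k] < s[j]), default=INF)
--         right = min((c[k] for k in range(j + 1, n) if s[j] < s[k]), default=INF)
--         ans = min(ans, left + c[j] + right)
--     return -1 if ans == INF else ans
-- ===== Notes on version B (the rewrite author's own statement) =====
-- stated objective: alternative
-- what changed: Replaces A's layered end-at DP table (dp[i][j] = cheapest increasing j-chain ending at i, built layer over layer from the previous layer's values) by a middle-pivot scan: for each middle index j it combines the cheapest smaller-s element to its left with the cheapest larger-s element to its right, never forming chain-ending DP values.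
import Mathlib
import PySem

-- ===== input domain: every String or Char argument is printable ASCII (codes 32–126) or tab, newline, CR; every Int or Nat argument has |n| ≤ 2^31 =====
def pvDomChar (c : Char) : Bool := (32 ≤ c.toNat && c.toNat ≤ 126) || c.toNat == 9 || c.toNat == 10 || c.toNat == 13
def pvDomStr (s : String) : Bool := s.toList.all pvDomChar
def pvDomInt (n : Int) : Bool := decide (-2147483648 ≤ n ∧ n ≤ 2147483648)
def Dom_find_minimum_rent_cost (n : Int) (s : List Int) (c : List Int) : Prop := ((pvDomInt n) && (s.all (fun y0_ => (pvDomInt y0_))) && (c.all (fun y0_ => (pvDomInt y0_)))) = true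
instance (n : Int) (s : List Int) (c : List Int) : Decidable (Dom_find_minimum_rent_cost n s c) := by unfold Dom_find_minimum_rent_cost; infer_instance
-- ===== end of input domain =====

-- B replaces A's layered end-at DP table (dp[i][j] built layer over layer) by a
-- middle-pivot scan: for each middle index it combines the cheapest smaller-s
-- element on the left with the cheapest larger-s element on the right (objective:
-- alternative algorithm of the same quadratic cost).
-- Python's math.inf is modelled as `none` (Option Int): `ominA` is Python `min`,
-- `oaddA`/`oadd2` are `+` with inf absorption; this is exact since only ints and inf occur.

-- ===== PORT A =====
-- Python `min` on int-or-inf values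
def ominA (a b : Option Int) : Option Int :=
  match a, b with
  | none, b => b
  | some x, none => some x
  | some x, some y => some (min x y)

-- Python `+` of an int-or-inf value and an int
def oaddA (a : Option Int) (t : Int) : Option Int := a.map (· + t)

-- dp[i][j] read / write on the 2D list
def pvGetCell (dp : List (List (Option Int))) (i j : Nat) : Option Int :=
  (dp.getD i []).getD j none

def pvSetCell (dp : List (List (Option Int))) (i j : Nat) (v : Option Int) : List (List (Option Int)) :=
  dp.set i ((dp.getD i []).set j v)

def find_minimum_rent_cost (n : Int) (s : List Int) (c : List Int) : Int :=
  let N := n.toNat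
  -- dp = [[0, inf, inf, inf] for _ in range(n)]
  let dp0 : List (List (Option Int)) := List.replicate N [some 0, none, none, none]
  -- dp[0][1] = c[0]
  let dp1 := pvSetCell dp0 0 1 (some (c.getD 0 0))
  -- for j in range(1,4): for i in range(1,n): for k in reversed(range(i)): ...
  let dpF := (List.range' 1 3).foldl (fun dp j =>
    (List.range' 1 (N - 1)).foldl (fun dp i =>
      ((List.range i).reverse).foldl (fun dp k =>
        if j = 1 ∨ s.getD k 0 < s.getD i 0 then
          pvSetCell dp i j (ominA (pvGetCell dp i j) (oaddA (pvGetCell dp k (j - 1)) (c.getD i 0)))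
        else dp) dp) dp) dp1
  -- result = min(x[3] for x in dp); return result if result != inf else -1
  match (List.range N).foldl (fun acc i => ominA acc (pvGetCell dpF i 3)) none with
  | none => -1
  | some v => v

-- ===== PORT B =====
-- Python `+` of two int-or-inf values
def oadd2 : Option Int → Option Int → Option Int
  | some x, some y => some (x + y)
  | _, _ => none

def find_minimum_rent_cost_alt (n : Int) (s : List Int) (c : List Int) : Int :=
  let N := n.toNat
  -- for j in range(n): left = min(c[k] for k<j if s[k]<s[j]); right = min(c[k] for k>j if s[j]<s[k]);
  --                    ans = min(ans, left + c[j] + right)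
  let ans := (List.range N).foldl (fun ans j =>
    let left := (List.range j).foldl (fun m k =>
      if s.getD k 0 < s.getD j 0 then ominA m (some (c.getD k 0)) else m) none
    let right := (List.range' (j + 1) (N - (j + 1))).foldl (fun m k =>
      if s.getD j 0 < s.getD k 0 then ominA m (some (c.getD k 0)) else m) none
    ominA ans (oadd2 (oaddA left (c.getD j 0)) right)) none
  -- return -1 if ans == INF else ans
  match ans with
  | none => -1
  | some v => v

-- ===== PRECONDITION & SPEC =====
-- Pre_ excludes exactly the inputs where the Python A raises (IndexError / min of
-- empty sequence): n < 1, c shorter than n, or (for n ≥ 2) s shorter than n.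
def Pre_find_minimum_rent_cost (n : Int) (s : List Int) (c : List Int) : Prop :=
  1 ≤ n ∧ n ≤ (c.length : Int) ∧ (n = 1 ∨ n ≤ (s.length : Int))

instance (n : Int) (s : List Int) (c : List Int) : Decidable (Pre_find_minimum_rent_cost n s c) := by
  unfold Pre_find_minimum_rent_cost; infer_instance

def pvWitness_find_minimum_rent_cost : Int × List Int × List Int := (3, [1, 2, 3], [4, 5, 6])

def Spec_find_minimum_rent_cost (n : Int) (s : List Int) (c : List Int) (out : Int) : Prop := out = find_minimum_rent_cost_alt n s c
instance (n : Int) (s : List Int) (c : List Int) (out : Int) : Decidable (Spec_find_minimum_rent_cost n s c out) := by unfold Spec_find_minimum_rent_cost; infer_instance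

-- ===== CLAIM (what is proved, stated in full; the proofs are below) =====
def Claim_equal_find_minimum_rent_cost : Prop := ∀ (n : Int) (s : List Int) (c : List Int), Dom_find_minimum_rent_cost n s c → Pre_find_minimum_rent_cost n s c → Spec_find_minimum_rent_cost n s c (find_minimum_rent_cost n s c)


-- ===== LEMMAS AND PROOFS =====

-- canonical spec values: cheapest increasing pair / triple ending at i
def M2v (s c : List Int) (i : Nat) : Option Int :=
  (List.range i).foldl (fun m k => if s.getD k 0 < s.getD i 0 then ominA m (some (c.getD k 0)) else m) none

def V2v (s c : List Int) (i : Nat) : Option Int := oaddA (M2v s c i) (c.getD i 0)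

def M3v (s c : List Int) (i : Nat) : Option Int :=
  (List.range i).foldl (fun m k => if s.getD k 0 < s.getD i 0 then ominA m (V2v s c k) else m) none

def V3v (s c : List Int) (i : Nat) : Option Int := oaddA (M3v s c i) (c.getD i 0)

def pvFinal (s c : List Int) (N : Nat) : Int :=
  match (List.range N).foldl (fun acc i => ominA acc (V3v s c i)) none with
  | none => -1
  | some v => v

-- option-min algebra
theorem ominA_comm (a b : Option Int) : ominA a b = ominA b a := by
  cases a <;> cases b <;> simp [ominA, min_comm]

theorem ominA_assoc (a b c : Option Int) : ominA (ominA a b) c = ominA a (ominA b c) := by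
  cases a <;> cases b <;> cases c <;> simp [ominA, min_assoc]

theorem ominA_none_right (a : Option Int) : ominA a none = a := by
  cases a <;> rfl

theorem oaddA_ominA (a b : Option Int) (t : Int) :
    oaddA (ominA a b) t = ominA (oaddA a t) (oaddA b t) := by
  cases a <;> cases b <;> simp [ominA, oaddA, min_def] <;> split_ifs <;> omega

-- generic fold lemmas
theorem pvFoldlOut {alpha beta : Type} (f : beta -> alpha -> beta)
    (h : forall b k1 k2, f (f b k1) k2 = f (f b k2) k1) :
    forall (l : List alpha) (init : beta) (x : alpha),
      l.foldl f (f init x) = f (l.foldl f init) x := by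
  intro l
  induction l with
  | nil => intro init x; simp
  | cons y l ih =>
    intro init x
    simp only [List.foldl_cons]
    rw [h init x y, ih]

theorem pvFoldlRev {alpha beta : Type} (f : beta -> alpha -> beta)
    (h : forall b k1 k2, f (f b k1) k2 = f (f b k2) k1) :
    forall (l : List alpha) (init : beta), l.reverse.foldl f init = l.foldl f init := by
  intro l
  induction l with
  | nil => intro init; simp
  | cons y l ih =>
    intro init
    simp only [List.reverse_cons, List.foldl_append, List.foldl_cons, List.foldl_nil, ih]
    rw [pvFoldlOut f h]

theorem minStep_lcomm (P : Nat -> Prop) [DecidablePred P] (g : Nat -> Option Int) :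
    forall (b : Option Int) (k1 k2 : Nat),
      (fun a k => if P k then ominA a (g k) else a)
        ((fun a k => if P k then ominA a (g k) else a) b k1) k2
      = (fun a k => if P k then ominA a (g k) else a)
          ((fun a k => if P k then ominA a (g k) else a) b k2) k1 := by
  intro b k1 k2
  by_cases h1 : P k1 <;> by_cases h2 : P k2 <;> simp [h1, h2]
  rw [ominA_assoc, ominA_assoc, ominA_comm (g k1) (g k2)]

theorem pvFoldlMinOadd (P : Nat -> Prop) [DecidablePred P] (g : Nat -> Option Int) (t : Int) :
    forall (l : List Nat) (acc : Option Int),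
      l.foldl (fun a k => if P k then ominA a (oaddA (g k) t) else a) (oaddA acc t)
      = oaddA (l.foldl (fun a k => if P k then ominA a (g k) else a) acc) t := by
  intro l
  induction l with
  | nil => intro acc; simp
  | cons k l ih =>
    intro acc
    simp only [List.foldl_cons]
    by_cases hk : P k
    · simp only [hk, if_pos, ← oaddA_ominA]
      exact ih (ominA acc (g k))
    · simp only [hk, if_neg, ite_false]
      exact ih acc

theorem pvFoldlConstMinSome (v : Int) :
    forall (l : List Nat), l.foldl (fun a (_ : Nat) => ominA a (some v)) (some v) = some v := by
  intro l
  induction l with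
  | nil => simp
  | cons k l ih => simpa [ominA] using ih

theorem pvFoldlConstMin (v : Int) (l : List Nat) (h : l ≠ []) :
    l.foldl (fun a (_ : Nat) => ominA a (some v)) none = some v := by
  cases l with
  | nil => exact absurd rfl h
  | cons k l => simpa [ominA] using pvFoldlConstMinSome v l

-- cell lemmas
def GoodN (N : Nat) (dp : List (List (Option Int))) : Prop :=
  dp.length = N ∧ ∀ i, i < N → (dp.getD i []).length = 4

theorem pvGetCell_out (dp : List (List (Option Int))) (i j : Nat) (h : dp.length ≤ i) :
    pvGetCell dp i j = none := by
  unfold pvGetCell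
  simp [List.getD_eq_getElem?_getD, List.getElem?_eq_none h]

theorem pvGetCell_set (dp : List (List (Option Int))) (i j : Nat) (v : Option Int) (a b : Nat)
    (hi : i < dp.length) (hj : j < (dp.getD i []).length) :
    pvGetCell (pvSetCell dp i j v) a b = if a = i ∧ b = j then v else pvGetCell dp a b := by
  unfold pvGetCell pvSetCell
  simp only [List.getD_eq_getElem?_getD] at hj ⊢
  rw [List.getElem?_set]
  by_cases hai : i = a
  · subst hai
    rw [if_pos rfl, if_pos hi, Option.getD_some, List.getElem?_set]
    by_cases hbj : j = b
    · subst hbj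
      rw [if_pos rfl, if_pos hj, if_pos ⟨rfl, rfl⟩]
      simp
    · rw [if_neg hbj, if_neg (by tauto)]
  · rw [if_neg hai, if_neg (by tauto)]

theorem goodN_set (N : Nat) (dp : List (List (Option Int))) (i j : Nat) (v : Option Int)
    (h : GoodN N dp) (hi : i < N) :
    GoodN N (pvSetCell dp i j v) := by
  obtain ⟨hlen, hrow⟩ := h
  constructor
  · simp [pvSetCell, hlen]
  · intro a ha
    unfold pvSetCell
    rw [List.getD_eq_getElem?_getD, List.getElem?_set]
    by_cases hia : i = a
    · subst hia
      simp only [if_pos rfl, if_pos (hlen ▸ hi)]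
      simpa using hrow i hi
    · simp only [if_neg hia]
      rw [← List.getD_eq_getElem?_getD]
      exact hrow a ha

-- A-side layer machinery
def innerF (s c : List Int) (j i : Nat) (dp : List (List (Option Int))) (k : Nat) :
    List (List (Option Int)) :=
  if j = 1 ∨ s.getD k 0 < s.getD i 0 then
    pvSetCell dp i j (ominA (pvGetCell dp i j) (oaddA (pvGetCell dp k (j - 1)) (c.getD i 0)))
  else dp

def ghostF (s c : List Int) (j i : Nat) (dp : List (List (Option Int)))
    (acc : Option Int) (k : Nat) : Option Int :=
  if j = 1 ∨ s.getD k 0 < s.getD i 0 then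
    ominA acc (oaddA (pvGetCell dp k (j - 1)) (c.getD i 0))
  else acc

def stepRow (s c : List Int) (j : Nat) (dp : List (List (Option Int))) (i : Nat) :
    List (List (Option Int)) :=
  ((List.range i).reverse).foldl (innerF s c j i) dp

def layerF (s c : List Int) (N : Nat) (dp : List (List (Option Int))) (j : Nat) :
    List (List (Option Int)) :=
  (List.range' 1 (N - 1)).foldl (stepRow s c j) dp

def dpInit (c : List Int) (N : Nat) : List (List (Option Int)) :=
  pvSetCell (List.replicate N [some 0, none, none, none]) 0 1 (some (c.getD 0 0))

theorem inner_spec (s c : List Int) (j i N : Nat) (hj1 : 1 ≤ j) (hj4 : j < 4) :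
    forall (ks : List Nat) (dp : List (List (Option Int))), GoodN N dp → i < N →
      GoodN N (ks.foldl (innerF s c j i) dp) ∧
      (∀ a b, ¬(a = i ∧ b = j) → pvGetCell (ks.foldl (innerF s c j i) dp) a b = pvGetCell dp a b) ∧
      pvGetCell (ks.foldl (innerF s c j i) dp) i j
        = ks.foldl (ghostF s c j i dp) (pvGetCell dp i j) := by
  intro ks
  induction ks with
  | nil => intro dp hg hi; exact ⟨hg, fun a b _ => rfl, rfl⟩
  | cons k ks ih =>
    intro dp hg hi
    have hlen : i < dp.length := hg.1 ▸ hi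
    have hrow : j < (dp.getD i []).length := by rw [hg.2 i hi]; exact hj4
    by_cases hc : j = 1 ∨ s.getD k 0 < s.getD i 0
    · set v := ominA (pvGetCell dp i j) (oaddA (pvGetCell dp k (j - 1)) (c.getD i 0)) with hv
      have hstep : innerF s c j i dp k = pvSetCell dp i j v := by
        unfold innerF
        rw [if_pos hc]
      have hg1 : GoodN N (pvSetCell dp i j v) := goodN_set N dp i j v hg hi
      obtain ⟨hG, hP, hV⟩ := ih (pvSetCell dp i j v) hg1 hi
      have hcells : ∀ a b, ¬(a = i ∧ b = j) →
          pvGetCell (pvSetCell dp i j v) a b = pvGetCell dp a b := by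
        intro a b hab
        rw [pvGetCell_set dp i j v a b hlen hrow, if_neg hab]
      have hghost : ghostF s c j i (pvSetCell dp i j v) = ghostF s c j i dp := by
        funext acc k'
        unfold ghostF
        have : pvGetCell (pvSetCell dp i j v) k' (j - 1) = pvGetCell dp k' (j - 1) := by
          apply hcells
          intro hcon
          omega
        rw [this]
      have hselfcell : pvGetCell (pvSetCell dp i j v) i j = v := by
        rw [pvGetCell_set dp i j v i j hlen hrow]; simp
      refine ⟨by simpa [List.foldl_cons, hstep] using hG, ?_, ?_⟩
      · intro a b hab
        rw [List.foldl_cons, hstep, hP a b hab, hcells a b hab]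
      · have hinit : ghostF s c j i dp (pvGetCell dp i j) k = v := by
          unfold ghostF
          rw [if_pos hc, hv]
        rw [List.foldl_cons, List.foldl_cons, hstep, hV, hghost, hselfcell, hinit]
    · have hstep : innerF s c j i dp k = dp := by
        unfold innerF
        rw [if_neg hc]
      obtain ⟨hG, hP, hV⟩ := ih dp hg hi
      refine ⟨by simpa [List.foldl_cons, hstep] using hG, ?_, ?_⟩
      · intro a b hab; rw [List.foldl_cons, hstep, hP a b hab]
      · have hinit : ghostF s c j i dp (pvGetCell dp i j) k = pvGetCell dp i j := by
          unfold ghostF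
          rw [if_neg hc]
        rw [List.foldl_cons, List.foldl_cons, hstep, hV, hinit]

theorem layer_spec (s c : List Int) (j N : Nat) (hj1 : 1 ≤ j) (hj4 : j < 4) :
    forall (is : List Nat) (dp : List (List (Option Int))), GoodN N dp → is.Nodup →
      (∀ i ∈ is, i < N) →
      GoodN N (is.foldl (stepRow s c j) dp) ∧
      (∀ a b, (b ≠ j ∨ a ∉ is) → pvGetCell (is.foldl (stepRow s c j) dp) a b = pvGetCell dp a b) ∧
      (∀ a ∈ is, pvGetCell (is.foldl (stepRow s c j) dp) a j
         = ((List.range a).reverse).foldl (ghostF s c j a dp) (pvGetCell dp a j)) := by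
  intro is
  induction is with
  | nil => intro dp hg _ _; exact ⟨hg, fun a b _ => rfl, fun a ha => absurd ha (List.not_mem_nil)⟩
  | cons i is ih =>
    intro dp hg hnd hmem
    have hiN : i < N := hmem i List.mem_cons_self
    obtain ⟨hG1, hP1, hV1⟩ :=
      inner_spec s c j i N hj1 hj4 ((List.range i).reverse) dp hg hiN
    have hstep : stepRow s c j dp i = ((List.range i).reverse).foldl (innerF s c j i) dp := rfl
    rw [← hstep] at hG1 hP1 hV1
    set dp1 := stepRow s c j dp i with hdp1
    obtain ⟨hG, hP, hV⟩ := ih dp1 hG1 hnd.of_cons (fun a ha => hmem a (List.mem_cons_of_mem _ ha))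
    have hinotin : i ∉ is := (List.nodup_cons.mp hnd).1
    have hghost : ∀ a, ghostF s c j a dp1 = ghostF s c j a dp := by
      intro a
      funext acc k'
      unfold ghostF
      have : pvGetCell dp1 k' (j - 1) = pvGetCell dp k' (j - 1) := by
        apply hP1; intro hcon; omega
      rw [this]
    refine ⟨by rw [List.foldl_cons, ← hdp1]; exact hG, ?_, ?_⟩
    · intro a b hab
      have hab' : b ≠ j ∨ a ∉ is := by
        rcases hab with h | h
        · exact Or.inl h
        · exact Or.inr (fun hin => h (List.mem_cons_of_mem _ hin))
      have hab2 : ¬(a = i ∧ b = j) := by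
        rcases hab with h | h
        · intro hcon; exact h hcon.2
        · intro hcon; exact h (hcon.1 ▸ List.mem_cons_self)
      rw [List.foldl_cons, ← hdp1, hP a b hab', hP1 a b hab2]
    · intro a ha
      rw [List.foldl_cons, ← hdp1]
      rcases List.mem_cons.mp ha with rfl | ha'
      · rw [hP a j (Or.inr hinotin), hV1]
      · rw [hV a ha', hghost a]
        congr 1
        apply hP1
        intro hcon
        exact hinotin (hcon.1 ▸ ha')

theorem rowGetD (b : Nat) :
    ([some 0, none, none, none] : List (Option Int)).getD b none
      = if b = 0 then some 0 else none := by
  rcases b with _|_|_|_|b <;> rfl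

theorem dpInit_good (c : List Int) (N : Nat) : GoodN N (dpInit c N) := by
  constructor
  · simp [dpInit, pvSetCell]
  · intro i hi
    unfold dpInit pvSetCell
    rw [List.getD_eq_getElem?_getD, List.getElem?_set]
    by_cases h0 : 0 = i
    · subst h0
      have h0N : 0 < N := by omega
      rw [if_pos rfl, if_pos (by simpa using h0N)]
      simp [List.length_set, List.getElem?_replicate, h0N]
    · rw [if_neg h0, ← List.getD_eq_getElem?_getD, List.getD_replicate _ hi]
      rfl

theorem dpInit_cell (c : List Int) (N a b : Nat) :
    pvGetCell (dpInit c N) a b =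
      if a = 0 ∧ b = 1 ∧ 0 < N then some (c.getD 0 0)
      else if a < N ∧ b = 0 then some 0 else none := by
  by_cases hN : 0 < N
  · unfold dpInit
    rw [pvGetCell_set _ _ _ _ _ _ (by simpa using hN)
        (by rw [List.getD_replicate _ hN]; decide)]
    by_cases hab : a = 0 ∧ b = 1
    · rw [if_pos hab, if_pos ⟨hab.1, hab.2, hN⟩]
    · rw [if_neg hab, if_neg (by tauto)]
      by_cases ha : a < N
      · unfold pvGetCell
        rw [List.getD_replicate _ ha, rowGetD]
        by_cases hb : b = 0
        · rw [if_pos hb, if_pos ⟨ha, hb⟩]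
        · rw [if_neg hb, if_neg (by tauto)]
      · rw [pvGetCell_out _ _ _ (by simpa using Nat.le_of_not_lt ha)]
        rw [if_neg (by tauto)]
  · have hN0 : N = 0 := by omega
    subst hN0
    unfold dpInit pvSetCell pvGetCell
    simp

theorem memRange' (N : Nat) (hN : 1 ≤ N) (a : Nat) :
    a ∈ List.range' 1 (N - 1) ↔ 1 ≤ a ∧ a < N := by
  rw [List.mem_range'_1]
  omega

theorem layerF_eq (s c : List Int) (N : Nat) (dp : List (List (Option Int))) (j : Nat) :
    (List.range' 1 (N - 1)).foldl (stepRow s c j) dp = layerF s c N dp j := rfl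

theorem stage1 (s c : List Int) (N : Nat) (hN : 1 ≤ N) :
    GoodN N (layerF s c N (dpInit c N) 1) ∧
    (∀ k, k < N → pvGetCell (layerF s c N (dpInit c N) 1) k 1 = some (c.getD k 0)) ∧
    (∀ a b, b = 2 ∨ b = 3 → pvGetCell (layerF s c N (dpInit c N) 1) a b = none) := by
  obtain ⟨hG, hP, hV⟩ := layer_spec s c 1 N (by omega) (by omega) (List.range' 1 (N - 1))
    (dpInit c N) (dpInit_good c N) (List.nodup_range' 1)
    (fun i hi => ((memRange' N hN i).mp hi).2)
  rw [layerF_eq] at hG hP hV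
  refine ⟨hG, ?_, ?_⟩
  · intro k hk
    by_cases hk0 : k = 0
    · subst hk0
      rw [hP 0 1 (Or.inr (by rw [memRange' N hN]; omega)), dpInit_cell]
      rw [if_pos ⟨rfl, rfl, by omega⟩]
    · have hkmem : k ∈ List.range' 1 (N - 1) := by rw [memRange' N hN]; omega
      rw [hV k hkmem]
      have hstart : pvGetCell (dpInit c N) k 1 = none := by
        rw [dpInit_cell, if_neg (by tauto), if_neg (by omega)]
      rw [hstart]
      have hext : ∀ (acc : Option Int), ∀ k' ∈ (List.range k).reverse,
          ghostF s c 1 k (dpInit c N) acc k'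
            = (fun (a : Option Int) (_ : Nat) => ominA a (some (c.getD k 0))) acc k' := by
        intro acc k' hk'
        have hk'lt : k' < k := by
          rw [List.mem_reverse, List.mem_range] at hk'
          exact hk'
        unfold ghostF
        rw [if_pos (Or.inl rfl), dpInit_cell, if_neg (by omega), if_pos ⟨by omega, rfl⟩]
        simp [oaddA]
      rw [List.foldl_ext _ _ _ hext]
      apply pvFoldlConstMin
      simp [List.reverse_eq_nil_iff, List.range_eq_nil]
      omega
  · intro a b hb
    rw [hP a b (Or.inl (by omega))]
    rw [dpInit_cell, if_neg (by omega), if_neg (by omega)]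

theorem pvFoldlMinOadd' (P : Nat -> Prop) [DecidablePred P] (g : Nat -> Option Int) (t : Int)
    (l : List Nat) :
    l.foldl (fun a k => if P k then ominA a (oaddA (g k) t) else a) none
      = oaddA (l.foldl (fun a k => if P k then ominA a (g k) else a) none) t := by
  have h := pvFoldlMinOadd P g t l none
  simpa [oaddA] using h

theorem stage2 (s c : List Int) (N : Nat) (hN : 1 ≤ N) :
    GoodN N (layerF s c N (layerF s c N (dpInit c N) 1) 2) ∧
    (∀ a, a < N → pvGetCell (layerF s c N (layerF s c N (dpInit c N) 1) 2) a 2 = V2v s c a) ∧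
    (∀ a, pvGetCell (layerF s c N (layerF s c N (dpInit c N) 1) 2) a 3 = none) := by
  obtain ⟨hG1, h1col1, h1none⟩ := stage1 s c N hN
  obtain ⟨hG, hP, hV⟩ := layer_spec s c 2 N (by omega) (by omega) (List.range' 1 (N - 1))
    (layerF s c N (dpInit c N) 1) hG1 (List.nodup_range' 1)
    (fun i hi => ((memRange' N hN i).mp hi).2)
  rw [layerF_eq] at hG hP hV
  refine ⟨hG, ?_, ?_⟩
  · intro a ha
    by_cases ha0 : a = 0
    · subst ha0
      rw [hP 0 2 (Or.inr (by rw [memRange' N hN]; omega)), h1none 0 2 (Or.inl rfl)]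
      simp [V2v, M2v, oaddA]
    · have hamem : a ∈ List.range' 1 (N - 1) := by rw [memRange' N hN]; omega
      rw [hV a hamem, h1none a 2 (Or.inl rfl)]
      have hext : ∀ (acc : Option Int), ∀ k ∈ (List.range a).reverse,
          ghostF s c 2 a (layerF s c N (dpInit c N) 1) acc k
            = (fun (m : Option Int) (k : Nat) =>
                if s.getD k 0 < s.getD a 0 then
                  ominA m (oaddA (some (c.getD k 0)) (c.getD a 0)) else m) acc k := by
        intro acc k hk
        have hklt : k < a := by rw [List.mem_reverse, List.mem_range] at hk; exact hk
        unfold ghostF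
        rw [h1col1 k (by omega)]
        have hiff : ((2 : Nat) = 1 ∨ s.getD k 0 < s.getD a 0) ↔ s.getD k 0 < s.getD a 0 := by
          constructor
          · rintro (h | h)
            · omega
            · exact h
          · exact Or.inr
        simp only [hiff]
      rw [List.foldl_ext _ _ _ hext]
      rw [pvFoldlRev _ (minStep_lcomm (fun k => s.getD k 0 < s.getD a 0)
            (fun k => oaddA (some (c.getD k 0)) (c.getD a 0)))]
      rw [pvFoldlMinOadd' (fun k => s.getD k 0 < s.getD a 0)
            (fun k => some (c.getD k 0)) (c.getD a 0)]
      rfl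
  · intro a
    rw [hP a 3 (Or.inl (by omega)), h1none a 3 (Or.inr rfl)]

theorem stage3 (s c : List Int) (N : Nat) (hN : 1 ≤ N) :
    ∀ a, a < N →
      pvGetCell (layerF s c N (layerF s c N (layerF s c N (dpInit c N) 1) 2) 3) a 3
        = V3v s c a := by
  obtain ⟨hG2, h2col2, h2none⟩ := stage2 s c N hN
  obtain ⟨hG, hP, hV⟩ := layer_spec s c 3 N (by omega) (by omega) (List.range' 1 (N - 1))
    (layerF s c N (layerF s c N (dpInit c N) 1) 2) hG2 (List.nodup_range' 1)
    (fun i hi => ((memRange' N hN i).mp hi).2)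
  rw [layerF_eq] at hG hP hV
  intro a ha
  by_cases ha0 : a = 0
  · subst ha0
    rw [hP 0 3 (Or.inr (by rw [memRange' N hN]; omega)), h2none 0]
    simp [V3v, M3v, oaddA]
  · have hamem : a ∈ List.range' 1 (N - 1) := by rw [memRange' N hN]; omega
    rw [hV a hamem, h2none a]
    have hext : ∀ (acc : Option Int), ∀ k ∈ (List.range a).reverse,
        ghostF s c 3 a (layerF s c N (layerF s c N (dpInit c N) 1) 2) acc k
          = (fun (m : Option Int) (k : Nat) =>
              if s.getD k 0 < s.getD a 0 then
                ominA m (oaddA (V2v s c k) (c.getD a 0)) else m) acc k := by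
      intro acc k hk
      have hklt : k < a := by rw [List.mem_reverse, List.mem_range] at hk; exact hk
      unfold ghostF
      rw [h2col2 k (by omega)]
      have hiff : ((3 : Nat) = 1 ∨ s.getD k 0 < s.getD a 0) ↔ s.getD k 0 < s.getD a 0 := by
        constructor
        · rintro (h | h)
          · omega
          · exact h
        · exact Or.inr
      simp only [hiff]
    rw [List.foldl_ext _ _ _ hext]
    rw [pvFoldlRev _ (minStep_lcomm (fun k => s.getD k 0 < s.getD a 0)
          (fun k => oaddA (V2v s c k) (c.getD a 0)))]
    rw [pvFoldlMinOadd' (fun k => s.getD k 0 < s.getD a 0) (V2v s c) (c.getD a 0)]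
    rfl

def pvMatch (o : Option Int) : Int :=
  match o with
  | none => -1
  | some v => v

theorem portA_final (n : Int) (s c : List Int) (h : 1 ≤ n) :
    find_minimum_rent_cost n s c = pvFinal s c n.toNat := by
  have hN : 1 ≤ n.toNat := by omega
  have hA : find_minimum_rent_cost n s c
      = pvMatch ((List.range n.toNat).foldl
          (fun acc i => ominA acc
            (pvGetCell (layerF s c n.toNat
              (layerF s c n.toNat (layerF s c n.toNat (dpInit c n.toNat) 1) 2) 3) i 3))
          none) := rfl
  have hf : (List.range n.toNat).foldl
        (fun acc i => ominA acc
          (pvGetCell (layerF s c n.toNat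
            (layerF s c n.toNat (layerF s c n.toNat (dpInit c n.toNat) 1) 2) 3) i 3))
        none
      = (List.range n.toNat).foldl (fun acc i => ominA acc (V3v s c i)) none := by
    apply List.foldl_ext
    intro acc i hi
    rw [stage3 s c n.toNat hN i (List.mem_range.mp hi)]
  rw [hA, hf]
  rfl

-- ===== min-Fubini machinery for the B side =====

theorem fold_start (f : Nat → Option Int) :
    ∀ (l : List Nat) (a0 : Option Int),
      l.foldl (fun a x => ominA a (f x)) a0
        = ominA a0 (l.foldl (fun a x => ominA a (f x)) none) := by
  intro l
  induction l with
  | nil => intro a0; simp [ominA_none_right]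
  | cons x l ih =>
    intro a0
    simp only [List.foldl_cons]
    rw [ih (ominA a0 (f x)), ih (ominA none (f x)), ominA_assoc]
    rfl

theorem fold_none (f : Nat → Option Int) :
    ∀ (l : List Nat) (a0 : Option Int), (∀ x ∈ l, f x = none) →
      l.foldl (fun a x => ominA a (f x)) a0 = a0 := by
  intro l
  induction l with
  | nil => intro a0 _; rfl
  | cons x l ih =>
    intro a0 h
    simp only [List.foldl_cons]
    rw [h x List.mem_cons_self, ominA_none_right]
    exact ih a0 (fun y hy => h y (List.mem_cons_of_mem _ hy))

theorem ominA_swap4 (a b c d : Option Int) :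
    ominA (ominA a b) (ominA c d) = ominA (ominA a c) (ominA b d) := by
  rw [ominA_assoc, ominA_assoc, ← ominA_assoc b c d, ominA_comm b c, ominA_assoc c b d]

theorem fold_zip (g h : Nat → Option Int) :
    ∀ (l : List Nat),
      ominA (l.foldl (fun a x => ominA a (g x)) none) (l.foldl (fun a x => ominA a (h x)) none)
        = l.foldl (fun a x => ominA a (ominA (g x) (h x))) none := by
  intro l
  induction l with
  | nil => rfl
  | cons x l ih =>
    simp only [List.foldl_cons]
    rw [fold_start g l (ominA none (g x)), fold_start h l (ominA none (h x)),
        fold_start (fun x => ominA (g x) (h x)) l (ominA none (ominA (g x) (h x)))]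
    show ominA (ominA (g x) _) (ominA (h x) _) = ominA (ominA (g x) (h x)) _
    rw [ominA_swap4, ih]

theorem fubini (F : Nat → Nat → Option Int) (J : List Nat) :
    ∀ (I : List Nat),
      I.foldl (fun a i => ominA a (J.foldl (fun b j => ominA b (F j i)) none)) none
        = J.foldl (fun a j => ominA a (I.foldl (fun b i => ominA b (F j i)) none)) none := by
  intro I
  induction I with
  | nil =>
    simp only [List.foldl_nil]
    exact (fold_none (fun _ => none) J none (fun _ _ => rfl)).symm
  | cons i I ih =>
    simp only [List.foldl_cons]
    rw [fold_start (fun i => J.foldl (fun b j => ominA b (F j i)) none) I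
          (ominA none (J.foldl (fun b j => ominA b (F j i)) none))]
    show ominA (ominA none _) _ = _
    rw [ih]
    show ominA (J.foldl (fun b j => ominA b (F j i)) none)
        (J.foldl (fun a j => ominA a (I.foldl (fun b i' => ominA b (F j i')) none)) none) = _
    rw [fold_zip (fun j => F j i) (fun j => I.foldl (fun b i' => ominA b (F j i')) none) J]
    apply List.foldl_ext
    intro a j _
    congr 1
    rw [fold_start (fun i' => F j i') I (ominA none (F j i))]
    rfl

-- oadd2 algebra
theorem oadd2_none_right (a : Option Int) : oadd2 a none = none := by
  cases a <;> rfl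

theorem oadd2_comm (a b : Option Int) : oadd2 a b = oadd2 b a := by
  cases a <;> cases b <;> simp [oadd2, Int.add_comm]

theorem oaddA_eq_oadd2 (a : Option Int) (t : Int) : oaddA a t = oadd2 a (some t) := by
  cases a <;> rfl

theorem oadd2_ominA (a x y : Option Int) :
    oadd2 a (ominA x y) = ominA (oadd2 a x) (oadd2 a y) := by
  cases a <;> cases x <;> cases y <;> simp [oadd2, ominA, min_def] <;> split_ifs <;> omega

theorem oadd2_fold (a : Option Int) (f : Nat → Option Int) :
    ∀ (l : List Nat),
      oadd2 a (l.foldl (fun m x => ominA m (f x)) none)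
        = l.foldl (fun m x => ominA m (oadd2 a (f x))) none := by
  intro l
  induction l with
  | nil => exact oadd2_none_right a
  | cons x l ih =>
    simp only [List.foldl_cons]
    rw [fold_start f l (ominA none (f x)),
        fold_start (fun x => oadd2 a (f x)) l (ominA none (oadd2 a (f x)))]
    show oadd2 a (ominA (ominA none (f x)) _) = ominA (ominA none (oadd2 a (f x))) _
    rw [oadd2_ominA, ih]
    rfl

-- if-guard ↔ none-absorption
theorem fold_if_eq (P : Nat → Prop) [DecidablePred P] (v : Nat → Option Int)
    (l : List Nat) (a0 : Option Int) :
    l.foldl (fun m k => if P k then ominA m (v k) else m) a0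
      = l.foldl (fun m k => ominA m (if P k then v k else none)) a0 := by
  congr 1
  funext m k
  by_cases h : P k
  · simp [h]
  · simp [h, ominA_none_right]

-- the pair values both programs minimise over
def gP (s c : List Int) (j i : Nat) : Option Int :=
  if j < i ∧ s.getD j 0 < s.getD i 0 then oaddA (V2v s c j) (c.getD i 0) else none

theorem range_split (a N : Nat) (h : a ≤ N) :
    List.range N = List.range a ++ List.range' a (N - a) := by
  have h2 := List.range'_append (s := 0) (m := a) (n := N - a) (step := 1)
  simp only [Nat.one_mul, Nat.zero_add] at h2
  rw [List.range_eq_range', List.range_eq_range']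
  conv_lhs => rw [show N = a + (N - a) by omega]
  rw [← h2]

-- A's column value as a full-range fold over gP
theorem V3v_pairs (s c : List Int) (N i : Nat) (hi : i < N) :
    V3v s c i = (List.range N).foldl (fun b j => ominA b (gP s c j i)) none := by
  have h1 : V3v s c i
      = oadd2 ((List.range i).foldl
          (fun m j => ominA m (if s.getD j 0 < s.getD i 0 then V2v s c j else none)) none)
          (some (c.getD i 0)) := by
    rw [V3v, M3v, oaddA_eq_oadd2, fold_if_eq (fun j => s.getD j 0 < s.getD i 0) (V2v s c)]
  rw [h1, oadd2_comm, oadd2_fold]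
  have h2 : (List.range i).foldl
        (fun m j => ominA m (oadd2 (some (c.getD i 0)) (if s.getD j 0 < s.getD i 0 then V2v s c j else none))) none
      = (List.range i).foldl (fun b j => ominA b (gP s c j i)) none := by
    apply List.foldl_ext
    intro m j hj
    have hji : j < i := List.mem_range.mp hj
    congr 1
    unfold gP
    by_cases hs : s.getD j 0 < s.getD i 0
    · rw [if_pos hs, if_pos ⟨hji, hs⟩, oadd2_comm, ← oaddA_eq_oadd2]
    · rw [if_neg hs, if_neg (by tauto), oadd2_none_right]
  rw [h2, range_split i N (by omega), List.foldl_append]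
  rw [fold_none (fun j => gP s c j i) (List.range' i (N - i)) _ ?_]
  intro j hj
  have hij : i ≤ j := by
    rw [List.mem_range'_1] at hj
    omega
  have hc : ¬(j < i ∧ s.getD j 0 < s.getD i 0) := by omega
  simp only [gP]
  rw [if_neg hc]

-- B's candidate for middle j as a full-range fold over gP
theorem cand_pairs (s c : List Int) (N j : Nat) (hj : j < N) :
    oadd2 (V2v s c j)
        ((List.range' (j + 1) (N - (j + 1))).foldl
          (fun m k => if s.getD j 0 < s.getD k 0 then ominA m (some (c.getD k 0)) else m) none)
      = (List.range N).foldl (fun b i => ominA b (gP s c j i)) none := by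
  rw [fold_if_eq (fun k => s.getD j 0 < s.getD k 0) (fun k => some (c.getD k 0)), oadd2_fold]
  have h2 : (List.range' (j + 1) (N - (j + 1))).foldl
        (fun m k => ominA m (oadd2 (V2v s c j) (if s.getD j 0 < s.getD k 0 then some (c.getD k 0) else none))) none
      = (List.range' (j + 1) (N - (j + 1))).foldl (fun b i => ominA b (gP s c j i)) none := by
    apply List.foldl_ext
    intro m k hk
    have hjk : j < k := by
      rw [List.mem_range'_1] at hk
      omega
    congr 1
    unfold gP
    by_cases hs : s.getD j 0 < s.getD k 0
    · rw [if_pos hs, if_pos ⟨hjk, hs⟩, ← oaddA_eq_oadd2]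
    · rw [if_neg hs, if_neg (by tauto), oadd2_none_right]
  rw [h2, range_split (j + 1) N (by omega), List.foldl_append]
  rw [fold_none (fun i => gP s c j i) (List.range (j + 1)) none ?_]
  intro i hi
  have hij : i < j + 1 := List.mem_range.mp hi
  have hc : ¬(j < i ∧ s.getD j 0 < s.getD i 0) := by omega
  simp only [gP]
  rw [if_neg hc]

theorem portB_final (n : Int) (s c : List Int) :
    find_minimum_rent_cost_alt n s c
      = pvMatch ((List.range n.toNat).foldl
          (fun a j => ominA a ((List.range n.toNat).foldl (fun b i => ominA b (gP s c j i)) none))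
          none) := by
  have hB : find_minimum_rent_cost_alt n s c
      = pvMatch ((List.range n.toNat).foldl (fun ans j =>
          ominA ans (oadd2 (oaddA ((List.range j).foldl (fun m k =>
              if s.getD k 0 < s.getD j 0 then ominA m (some (c.getD k 0)) else m) none)
            (c.getD j 0))
            ((List.range' (j + 1) (n.toNat - (j + 1))).foldl (fun m k =>
              if s.getD j 0 < s.getD k 0 then ominA m (some (c.getD k 0)) else m) none))) none) := rfl
  rw [hB]
  congr 1
  apply List.foldl_ext
  intro a j hj
  have hjN : j < n.toNat := List.mem_range.mp hj
  congr 1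
  have hL : oaddA ((List.range j).foldl (fun m k =>
        if s.getD k 0 < s.getD j 0 then ominA m (some (c.getD k 0)) else m) none)
      (c.getD j 0) = V2v s c j := rfl
  rw [hL]
  exact cand_pairs s c n.toNat j hjN

theorem main_equiv : ∀ (n : Int) (s : List Int) (c : List Int),
    1 ≤ n → find_minimum_rent_cost n s c = find_minimum_rent_cost_alt n s c := by
  intro n s c h
  rw [portA_final n s c h, portB_final n s c]
  unfold pvFinal
  have hA : (List.range n.toNat).foldl (fun acc i => ominA acc (V3v s c i)) none
      = (List.range n.toNat).foldl
          (fun a i => ominA a ((List.range n.toNat).foldl (fun b j => ominA b (gP s c j i)) none))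
          none := by
    apply List.foldl_ext
    intro a i hi
    rw [V3v_pairs s c n.toNat i (List.mem_range.mp hi)]
  rw [hA, fubini (gP s c) (List.range n.toNat) (List.range n.toNat)]
  rfl

-- ===== VERDICT (by name: the statement is the Claim_ definition above) =====
theorem find_minimum_rent_cost_spec : Claim_equal_find_minimum_rent_cost := by
  intro n s c _ hpre
  exact main_equiv n s c hpre.1
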